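-- pv_equiv track=rewrite | github.com/TobyCourtis/algo-a-day-keeps-the-doctor-away | hackerrank/mock_assessment/rothesay/2.py | solution
-- ===== SOURCE A (Python) =====
-- def solution(A, B):
--     a_sum = sum(A)
--     b_sum = sum(B)
--
--     if a_sum > b_sum:
--         largest = sorted(A, reverse=True)
--         smallest = sorted(B)
--     else:
--         largest = sorted(B, reverse=True)
--         smallest = sorted(A)
--
--     diff = abs(a_sum - b_sum)
--
--     changes = 0
--     large_index = 0
--     small_index = 0
--     while diff > 0 and small_index < len(smallest) and large_index < len(largest):
--         if (largest[large_index] - 1) > (6 - smallest[small_index]):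
--             # making cur value in larger list equal to 1
--             diff -= (largest[large_index] - 1)
--             large_index += 1
--         else:
--             diff -= (6 - smallest[small_index])
--             small_index += 1
--         changes += 1
--
--     if diff < 0:
--         return changes
--
--     while diff > 0 and large_index < len(largest):
--         diff -= (largest[large_index] - 1)
--         large_index += 1
--         changes += 1
--
--     while diff > 0 and small_index < len(smallest):
--         diff -= (6 - smallest[small_index])
--         small_index += 1
--         changes += 1
--
--     return -1 if diff > 0 else changes
-- ===== SOURCE B (Python) =====
-- def solution(A, B):
--     d = sum(A) - sum(B)
--     if d == 0:
--         return 0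
--     hi, lo = (A, B) if d > 0 else (B, A)
--     gains = sorted([x - 1 for x in hi] + [6 - y for y in lo], reverse=True)
--     need = abs(d)
--     for k, g in enumerate(gains, 1):
--         need -= g
--         if need <= 0:
--             return k
--     return -1
-- ===== Notes on version B (the rewrite author's own statement) =====
-- stated objective: simpler
-- what changed: Replaces A's three two-pointer while-loops over two separately sorted lists with one sorted list of all per-die gains consumed greedily in a single scan.
import Mathlib
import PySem

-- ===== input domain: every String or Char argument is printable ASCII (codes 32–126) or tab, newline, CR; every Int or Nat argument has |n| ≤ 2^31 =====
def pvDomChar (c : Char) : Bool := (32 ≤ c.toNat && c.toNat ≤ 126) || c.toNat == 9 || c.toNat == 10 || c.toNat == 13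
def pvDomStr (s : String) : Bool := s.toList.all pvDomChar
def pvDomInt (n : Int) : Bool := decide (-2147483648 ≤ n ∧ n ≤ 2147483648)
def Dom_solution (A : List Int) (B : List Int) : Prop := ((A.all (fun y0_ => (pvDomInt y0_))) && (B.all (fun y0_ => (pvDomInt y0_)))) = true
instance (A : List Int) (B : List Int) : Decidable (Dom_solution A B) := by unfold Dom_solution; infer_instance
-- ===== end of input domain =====

-- B replaces A's three two-pointer while-loops over two separately sorted lists with one
-- sorted list of all per-die gains consumed in a single scan (objective: simpler).

-- ===== PORT A =====

-- while diff > 0 and small_index < len(smallest) and large_index < len(largest): …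
-- (indices over the fixed sorted lists become the corresponding suffixes)
-- fuel = large_len + small_len makes the two-pointer loop structurally recursive;
-- it is always called with enough fuel, so it simulates the while loop exactly
def loop1A : Nat → Int → List Int → List Int → Int → Int × List Int × List Int × Int
  | fuel + 1, diff, l :: L, s :: S, changes =>
    if diff > 0 then
      if l - 1 > 6 - s then loop1A fuel (diff - (l - 1)) L (s :: S) (changes + 1)
      else loop1A fuel (diff - (6 - s)) (l :: L) S (changes + 1)
    else (diff, l :: L, s :: S, changes)
  | _, diff, L, S, changes => (diff, L, S, changes)

-- while diff > 0 and large_index < len(largest): …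
def loop2A : Int → List Int → Int → Int × List Int × Int
  | diff, l :: L, changes =>
    if diff > 0 then loop2A (diff - (l - 1)) L (changes + 1) else (diff, l :: L, changes)
  | diff, [], changes => (diff, [], changes)

-- while diff > 0 and small_index < len(smallest): …
def loop3A : Int → List Int → Int → Int × List Int × Int
  | diff, s :: S, changes =>
    if diff > 0 then loop3A (diff - (6 - s)) S (changes + 1) else (diff, s :: S, changes)
  | diff, [], changes => (diff, [], changes)

def solution (A : List Int) (B : List Int) : Int :=
  let a_sum := A.sum
  let b_sum := B.sum
  let ls : List Int × List Int :=
    if a_sum > b_sum then (PySem.List.sorted A (fun x => x) true, PySem.List.sorted B (fun x => x) false)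
    else (PySem.List.sorted B (fun x => x) true, PySem.List.sorted A (fun x => x) false)
  let largest := ls.1
  let smallest := ls.2
  let diff := |a_sum - b_sum|
  match loop1A (largest.length + smallest.length) diff largest smallest 0 with
  | (d1, L1, S1, c1) =>
    if d1 < 0 then c1
    else
      match loop2A d1 L1 c1 with
      | (d2, _, c2) =>
        match loop3A d2 S1 c2 with
        | (d3, _, c3) => if d3 > 0 then -1 else c3

-- ===== PORT B =====

-- for k, g in enumerate(gains, 1): need -= g; if need <= 0: return k
def bloopB : Int → Int → List Int → Int
  | _, _, [] => -1
  | need, k, g :: gs => if need - g ≤ 0 then k else bloopB (need - g) (k + 1) gs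

def solution_alt (A : List Int) (B : List Int) : Int :=
  let d := A.sum - B.sum
  if d = 0 then 0
  else
    let hl : List Int × List Int := if d > 0 then (A, B) else (B, A)
    let gains := PySem.List.sorted (hl.1.map (fun x => x - 1) ++ hl.2.map (fun y => 6 - y)) (fun x => x) true
    bloopB |d| 1 gains

-- ===== PRECONDITION & SPEC =====
def Spec_solution (A : List Int) (B : List Int) (out : Int) : Prop := out = solution_alt A B
instance (A : List Int) (B : List Int) (out : Int) : Decidable (Spec_solution A B out) := by unfold Spec_solution; infer_instance

-- ===== CLAIM (what is proved, stated in full; the proofs are below) =====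
def Claim_equal_solution : Prop := ∀ (A : List Int) (B : List Int), Dom_solution A B → Spec_solution A B (solution A B)

-- ===== LEMMAS AND PROOFS =====

-- A's consumption order, as a list: merge of the two descending gain sequences.
def mergeG : List Int → List Int → List Int
  | [], bs => bs
  | as, [] => as
  | a :: as, b :: bs => if a > b then a :: mergeG as (b :: bs) else b :: mergeG (a :: as) bs
termination_by as bs => as.length + bs.length

-- the canonical greedy scan both programs reduce to
def scanA : Int → Int → List Int → Int
  | need, c, [] => if need > 0 then -1 else c
  | need, c, g :: gs => if need > 0 then scanA (need - g) (c + 1) gs else c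

-- names for the pieces of A's port after loop1
def tail3 (d : Int) (S : List Int) (c : Int) : Int :=
  match loop3A d S c with | (d3, _, c3) => if d3 > 0 then -1 else c3

def tail23 (d : Int) (L S : List Int) (c : Int) : Int :=
  match loop2A d L c with | (d2, _, c2) => tail3 d2 S c2

def postA (d : Int) (L S : List Int) (c : Int) : Int :=
  if d < 0 then c else tail23 d L S c

def fullA (fuel : Nat) (d : Int) (L S : List Int) (c : Int) : Int :=
  match loop1A fuel d L S c with | (d1, L1, S1, c1) => postA d1 L1 S1 c1

theorem scanA_nonpos (need c : Int) (gs : List Int) (h : ¬ need > 0) : scanA need c gs = c := by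
  cases gs <;> simp [scanA, h]

theorem loop1A_nonpos (fuel : Nat) (d c : Int) (L S : List Int) (h : ¬ d > 0) :
    loop1A fuel d L S c = (d, L, S, c) := by
  cases fuel <;> cases L <;> cases S <;> simp [loop1A, h]

theorem loop2A_nonpos (d c : Int) (L : List Int) (h : ¬ d > 0) : loop2A d L c = (d, L, c) := by
  cases L <;> simp [loop2A, h]

theorem loop3A_nonpos (d c : Int) (S : List Int) (h : ¬ d > 0) : loop3A d S c = (d, S, c) := by
  cases S <;> simp [loop3A, h]

theorem solution_eq_fullA (A B : List Int) :
    solution A B =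
      (if A.sum > B.sum then
        fullA ((PySem.List.sorted A (fun x => x) true).length + (PySem.List.sorted B (fun x => x) false).length)
          |A.sum - B.sum| (PySem.List.sorted A (fun x => x) true) (PySem.List.sorted B (fun x => x) false) 0
      else
        fullA ((PySem.List.sorted B (fun x => x) true).length + (PySem.List.sorted A (fun x => x) false).length)
          |A.sum - B.sum| (PySem.List.sorted B (fun x => x) true) (PySem.List.sorted A (fun x => x) false) 0) := by
  by_cases hgt : A.sum > B.sum <;>
    simp [solution, fullA, postA, tail23, tail3, hgt]

theorem tail3_scan (S : List Int) (d c : Int) :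
    tail3 d S c = scanA d c (S.map (fun s => 6 - s)) := by
  induction S generalizing d c with
  | nil => simp [tail3, loop3A, scanA]
  | cons s S ih =>
    by_cases h : d > 0
    · simpa [tail3, loop3A, scanA, h] using ih (d - (6 - s)) (c + 1)
    · simp [tail3, loop3A, scanA, h]

theorem tail23_scan (L S : List Int) (d c : Int) :
    tail23 d L S c = scanA d c (L.map (fun l => l - 1) ++ S.map (fun s => 6 - s)) := by
  induction L generalizing d c with
  | nil => simpa [tail23, loop2A] using tail3_scan S d c
  | cons l L ih =>
    by_cases h : d > 0
    · simpa [tail23, loop2A, scanA, h] using ih (d - (l - 1)) (c + 1)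
    · rw [scanA_nonpos _ _ _ h]
      simp [tail23, loop2A_nonpos d c (l :: L) h, tail3, loop3A_nonpos d c S h, h]

theorem postA_scan_nil_left (d : Int) (S : List Int) (c : Int) :
    postA d [] S c = scanA d c (mergeG ([] : List Int) (S.map (fun s => 6 - s))) := by
  by_cases h0 : d < 0
  · rw [scanA_nonpos _ _ _ (by omega)]; simp [postA, h0]
  · rw [postA, if_neg h0, tail23_scan]
    simp [mergeG]

theorem postA_scan_nil_right (d : Int) (L : List Int) (c : Int) :
    postA d L [] c = scanA d c (mergeG (L.map (fun l => l - 1)) ([] : List Int)) := by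
  by_cases h0 : d < 0
  · rw [scanA_nonpos _ _ _ (by omega)]
    cases L <;> simp [postA, h0]
  · rw [postA, if_neg h0]
    have := tail23_scan L [] d c
    simp only [List.map_nil, List.append_nil] at this
    rw [this]
    cases L <;> simp [mergeG]

theorem fullA_scan (fuel : Nat) (d : Int) (L S : List Int) (c : Int)
    (hf : L.length + S.length ≤ fuel) :
    fullA fuel d L S c = scanA d c (mergeG (L.map (fun l => l - 1)) (S.map (fun s => 6 - s))) := by
  induction fuel generalizing d L S c with
  | zero =>
    have hL : L = [] := by cases L <;> simp_all
    have hS : S = [] := by cases S <;> simp_all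
    subst hL; subst hS
    have h1 : fullA 0 d [] [] c = postA d [] [] c := by
      unfold fullA; rw [show loop1A 0 d [] [] c = (d, [], [], c) by simp [loop1A]]
    rw [h1, postA_scan_nil_left]; simp
  | succ fuel ih =>
    cases L with
    | nil =>
      have h1 : fullA (fuel + 1) d [] S c = postA d [] S c := by
        unfold fullA; rw [show loop1A (fuel + 1) d [] S c = (d, [], S, c) by simp [loop1A]]
      rw [h1, postA_scan_nil_left]; simp
    | cons l L =>
      cases S with
      | nil =>
        have h1 : fullA (fuel + 1) d (l :: L) [] c = postA d (l :: L) [] c := by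
          unfold fullA
          rw [show loop1A (fuel + 1) d (l :: L) [] c = (d, l :: L, [], c) by simp [loop1A]]
        rw [h1, postA_scan_nil_right]; simp
      | cons s S =>
        by_cases hd : d > 0
        · by_cases hcmp : l - 1 > 6 - s
          · have hstep : fullA (fuel + 1) d (l :: L) (s :: S) c
                = fullA fuel (d - (l - 1)) L (s :: S) (c + 1) := by
              unfold fullA
              rw [show loop1A (fuel + 1) d (l :: L) (s :: S) c
                    = loop1A fuel (d - (l - 1)) L (s :: S) (c + 1) by simp [loop1A, hd, hcmp]]
            rw [hstep, ih _ _ _ _ (by simp at hf ⊢; omega)]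
            simp [mergeG, scanA, hd, hcmp]
          · have hstep : fullA (fuel + 1) d (l :: L) (s :: S) c
                = fullA fuel (d - (6 - s)) (l :: L) S (c + 1) := by
              unfold fullA
              rw [show loop1A (fuel + 1) d (l :: L) (s :: S) c
                    = loop1A fuel (d - (6 - s)) (l :: L) S (c + 1) by simp [loop1A, hd, hcmp]]
            rw [hstep, ih _ _ _ _ (by simp at hf ⊢; omega)]
            simp [mergeG, scanA, hd, hcmp]
        · rw [scanA_nonpos _ _ _ hd]
          have h1 : fullA (fuel + 1) d (l :: L) (s :: S) c = postA d (l :: L) (s :: S) c := by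
            unfold fullA; rw [loop1A_nonpos (fuel + 1) d c (l :: L) (s :: S) hd]
          rw [h1]
          simp only [postA, tail23, loop2A_nonpos d c (l :: L) hd, tail3,
            loop3A_nonpos d c (s :: S) hd]
          split_ifs <;> omega

-- mergeG of two descending lists is a descending rearrangement of the concatenation
theorem mergeG_perm (as bs : List Int) : (mergeG as bs).Perm (as ++ bs) := by
  induction as, bs using mergeG.induct with
  | case1 bs => simp [mergeG]
  | case2 as h => simp [mergeG]
  | case3 a as b bs hcmp ih => simpa [mergeG, hcmp] using ih.cons a
  | case4 a as b bs hcmp ih =>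
    simp only [mergeG, if_neg hcmp]
    exact (ih.cons b).trans List.perm_middle.symm

theorem mem_mergeG {x : Int} {as bs : List Int} (h : x ∈ mergeG as bs) :
    x ∈ as ∨ x ∈ bs := by
  have := (mergeG_perm as bs).mem_iff.mp h
  simpa using this

theorem mergeG_pairwise (as bs : List Int)
    (ha : as.Pairwise (fun a b => b ≤ a)) (hb : bs.Pairwise (fun a b => b ≤ a)) :
    (mergeG as bs).Pairwise (fun a b => b ≤ a) := by
  induction as, bs using mergeG.induct with
  | case1 bs => simpa [mergeG] using hb
  | case2 as h => simpa [mergeG] using ha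
  | case3 a as b bs hcmp ih =>
    rcases ha with _ | ⟨ha1, ha2⟩
    simp only [mergeG, if_pos hcmp]
    refine List.Pairwise.cons ?_ (ih ha2 hb)
    intro x hx
    rcases mem_mergeG hx with hx | hx
    · exact ha1 x hx
    · rcases hb with _ | ⟨hb1, hb2⟩
      rcases List.mem_cons.mp hx with rfl | hx
      · omega
      · have := hb1 x hx; omega
  | case4 a as b bs hcmp ih =>
    rcases hb with _ | ⟨hb1, hb2⟩
    simp only [mergeG, if_neg hcmp]
    refine List.Pairwise.cons ?_ (ih ha hb2)
    intro x hx
    rcases mem_mergeG hx with hx | hx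
    · rcases ha with _ | ⟨ha1, ha2⟩
      rcases List.mem_cons.mp hx with rfl | hx
      · omega
      · have := ha1 x hx; omega
    · exact hb1 x hx

-- B's scan equals the canonical scan when the need is positive
theorem bloopB_scan (gs : List Int) (need c : Int) (h : need > 0) :
    bloopB need (c + 1) gs = scanA need c gs := by
  induction gs generalizing need c with
  | nil => simp [bloopB, scanA, h]
  | cons g gs ih =>
    by_cases h2 : need - g ≤ 0
    · have hz := scanA_nonpos (need - g) (c + 1) gs (by omega)
      simp [bloopB, scanA, h, h2, hz]
    · simp only [bloopB, scanA, if_pos h, if_neg h2]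
      exact ih (need - g) (c + 1) (by omega)

-- A's merge order and B's single sorted list are the same descending list
theorem merge_eq_sorted (X Y : List Int) :
    mergeG ((PySem.List.sorted X (fun x => x) true).map (fun x => x - 1))
           ((PySem.List.sorted Y (fun x => x) false).map (fun y => 6 - y))
      = PySem.List.sorted (X.map (fun x => x - 1) ++ Y.map (fun y => 6 - y)) (fun x => x) true := by
  refine List.Perm.eq_of_pairwise (fun a b _ _ h1 h2 => le_antisymm h2 h1) ?_ ?_ ?_
  · refine mergeG_pairwise _ _ ?_ ?_
    · exact (PySem.List.sorted_pairwise_rev X (fun x => x)).map _ (fun a b h => by omega)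
    · exact (PySem.List.sorted_pairwise Y (fun x => x)).map _ (fun a b h => by omega)
  · exact PySem.List.sorted_pairwise_rev _ _
  · refine (mergeG_perm _ _).trans ?_
    refine (List.Perm.append ((PySem.List.sorted_perm _ _ _).map _)
      ((PySem.List.sorted_perm _ _ _).map _)).trans ?_
    exact (PySem.List.sorted_perm _ _ _).symm

theorem solution_spec' (A B : List Int) : solution A B = solution_alt A B := by
  rw [solution_eq_fullA]
  by_cases h0 : A.sum - B.sum = 0
  · have hgt : ¬ A.sum > B.sum := by omega
    rw [if_neg hgt, fullA_scan _ _ _ _ _ le_rfl,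
      scanA_nonpos _ _ _ (by rw [abs_of_nonneg (by omega)]; omega)]
    simp [solution_alt, h0]
  · have habs : |A.sum - B.sum| > 0 := by rcases abs_pos.mpr h0 with h; omega
    by_cases hgt : A.sum > B.sum
    · rw [if_pos hgt, fullA_scan _ _ _ _ _ le_rfl, merge_eq_sorted, ← bloopB_scan _ _ 0 habs]
      simp [solution_alt, h0, show B.sum < A.sum by omega]
    · rw [if_neg hgt, fullA_scan _ _ _ _ _ le_rfl, merge_eq_sorted, ← bloopB_scan _ _ 0 habs]
      simp [solution_alt, h0, show ¬ B.sum < A.sum by omega]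

-- ===== VERDICT (by name: the statement is the Claim_ definition above) =====
theorem solution_spec : Claim_equal_solution := by
  intro A B _
  exact solution_spec' A B
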